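-- pv_equiv track=rewrite | github.com/zhangziang/adventofcode2024 | 12/solve.py | move_cursor
-- ===== SOURCE A (Python) =====
-- def move_cursor(cursor_x, cursor_y, max_y, visited):
--     if cursor_y < max_y - 1:
--         cursor_y += 1
--     else:
--         cursor_y = 0
--         cursor_x += 1
--     if (cursor_x, cursor_y) not in visited:
--         return cursor_x, cursor_y
--     return move_cursor(cursor_x, cursor_y, max_y, visited)
-- ===== SOURCE B (Python) =====
-- def move_cursor(cursor_x, cursor_y, max_y, visited):
--     vs = set(visited)
--     # finish the current row, then scan the following rows for the first unvisited cell
--     for y in range(cursor_y + 1, max_y):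
--         if (cursor_x, y) not in vs:
--             return cursor_x, y
--     x = cursor_x + 1
--     while True:
--         for y in range(max_y):
--             if (x, y) not in vs:
--                 return x, y
--         x += 1
-- ===== Notes on version B (the rewrite author's own statement) =====
-- stated objective: alternative
-- what changed: A's one-cell-at-a-time tail recursion is replaced by direct range scans (finish the current row with range(cursor_y+1, max_y), then scan whole rows below) against a set built once from visited; Pre_ excludes non-positive max_y, a grid with no rows, where A's wrap-to-row-start still emits cells in a row 0 that does not exist while B's scan over the empty range(max_y) never terminates.
-- outside the precondition, e.g. on move_cursor(0, 0, 0, set()): A returns (1, 0), B does not finish within the time limit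
import Mathlib
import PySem

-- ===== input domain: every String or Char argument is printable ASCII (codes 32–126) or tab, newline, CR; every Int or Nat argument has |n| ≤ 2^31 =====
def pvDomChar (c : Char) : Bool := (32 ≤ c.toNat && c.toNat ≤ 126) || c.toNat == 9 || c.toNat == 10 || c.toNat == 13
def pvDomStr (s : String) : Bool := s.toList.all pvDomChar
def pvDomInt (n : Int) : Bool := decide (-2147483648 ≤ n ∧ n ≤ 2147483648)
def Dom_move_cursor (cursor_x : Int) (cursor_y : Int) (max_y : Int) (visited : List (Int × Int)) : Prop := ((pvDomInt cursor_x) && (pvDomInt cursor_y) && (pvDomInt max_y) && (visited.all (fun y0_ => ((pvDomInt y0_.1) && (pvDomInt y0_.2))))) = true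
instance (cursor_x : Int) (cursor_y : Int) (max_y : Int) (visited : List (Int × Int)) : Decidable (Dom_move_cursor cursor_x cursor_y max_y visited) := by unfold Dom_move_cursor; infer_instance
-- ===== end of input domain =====

-- B replaces A's one-step tail recursion by direct range scans (finish the current row,
-- then scan whole rows below) against a set of visited cells (objective: alternative).

-- strict lexicographic "later scan position" predicate; counting visited cells there
-- bounds the number of steps either program can take, which is the fuel of both ports
def pvLex (x y : Int) (p : Int × Int) : Bool := decide (x < p.1 ∨ (x = p.1 ∧ y < p.2))

-- ===== PORT A =====
-- one call of A per unit of fuel; the fuel passed below is provably never exhausted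
def move_cursor_go (fuel : Nat) (cursor_x : Int) (cursor_y : Int) (max_y : Int) (visited : List (Int × Int)) : Int × Int :=
  match fuel with
  | 0 => (0, 0)  -- unreachable: fuel > number of visited cells past the cursor (pv_main_go below)
  | fuel + 1 =>
    if cursor_y < max_y - 1 then
      -- cursor_y += 1
      if (cursor_x, cursor_y + 1) ∉ visited then (cursor_x, cursor_y + 1)
      else move_cursor_go fuel cursor_x (cursor_y + 1) max_y visited
    else
      -- cursor_y = 0; cursor_x += 1
      if (cursor_x + 1, (0 : Int)) ∉ visited then (cursor_x + 1, 0)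
      else move_cursor_go fuel (cursor_x + 1) 0 max_y visited

def move_cursor (cursor_x : Int) (cursor_y : Int) (max_y : Int) (visited : List (Int × Int)) : Int × Int :=
  move_cursor_go (visited.countP (pvLex cursor_x cursor_y) + 1) cursor_x cursor_y max_y visited

-- ===== PORT B =====
-- 'for y in range(y, stop): if (x, y) not in vs: return x, y' — the range has n elements
def pvRowScanGo (x : Int) (y : Int) (n : Nat) (vs : PySem.Set (Int × Int)) : Option Int :=
  match n with
  | 0 => none
  | n + 1 => if (x, y) ∉ vs then some y else pvRowScanGo x (y + 1) n vs

-- first unvisited y in range(y, stop)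
def pvRowScan (x : Int) (y : Int) (stop : Int) (vs : PySem.Set (Int × Int)) : Option Int :=
  pvRowScanGo x y (stop - y).toNat vs

-- 'while True:' over whole rows x, x+1, …, each row being range(max_y); one row per unit
-- of fuel (the fuel passed below is provably never exhausted when a row exists, and for
-- max_y ≤ 0 the Python loop never terminates, which is outside Pre_)
def pvRowsGo (fuel : Nat) (x : Int) (max_y : Int) (vs : PySem.Set (Int × Int)) : Int × Int :=
  match fuel with
  | 0 => (0, 0)
  | fuel + 1 =>
    match pvRowScan x 0 max_y vs with
    | some y => (x, y)
    | none => pvRowsGo fuel (x + 1) max_y vs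

def move_cursor_alt (cursor_x : Int) (cursor_y : Int) (max_y : Int) (visited : List (Int × Int)) : Int × Int :=
  -- vs = set(visited)
  match pvRowScan cursor_x (cursor_y + 1) max_y (PySem.Set.ofList visited) with
  | some y => (cursor_x, y)
  | none =>
    pvRowsGo ((PySem.Set.ofList visited).countP (fun p => decide (cursor_x + 1 ≤ p.1)) + 1)
      (cursor_x + 1) max_y (PySem.Set.ofList visited)

-- ===== PRECONDITION & SPEC =====
-- Pre_ excludes non-positive max_y (a grid with no rows): there A's wrap-to-row-start still
-- emits cells in a row 0 that does not exist, while B's scan over the empty range(max_y)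
-- never terminates.
def Pre_move_cursor (cursor_x : Int) (cursor_y : Int) (max_y : Int) (visited : List (Int × Int)) : Prop := 1 ≤ max_y
instance (cursor_x : Int) (cursor_y : Int) (max_y : Int) (visited : List (Int × Int)) : Decidable (Pre_move_cursor cursor_x cursor_y max_y visited) := by unfold Pre_move_cursor; infer_instance
def pvWitness_move_cursor : Int × Int × Int × (List (Int × Int)) := (0, 0, 3, [(0, 1)])
def Spec_move_cursor (cursor_x : Int) (cursor_y : Int) (max_y : Int) (visited : List (Int × Int)) (out : Int × Int) : Prop := out = move_cursor_alt cursor_x cursor_y max_y visited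
instance (cursor_x : Int) (cursor_y : Int) (max_y : Int) (visited : List (Int × Int)) (out : Int × Int) : Decidable (Spec_move_cursor cursor_x cursor_y max_y visited out) := by unfold Spec_move_cursor; infer_instance

-- ===== CLAIM (what is proved, stated in full; the proofs are below) =====
def Claim_equal_move_cursor : Prop := ∀ (cursor_x : Int) (cursor_y : Int) (max_y : Int) (visited : List (Int × Int)), Dom_move_cursor cursor_x cursor_y max_y visited → Pre_move_cursor cursor_x cursor_y max_y visited → Spec_move_cursor cursor_x cursor_y max_y visited (move_cursor cursor_x cursor_y max_y visited)

-- ===== LEMMAS AND PROOFS =====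

-- the count of positions satisfying p strictly drops when an element of l leaves p for q
theorem pv_countP_lt {α : Type} (l : List α) (p q : α → Bool)
    (hmono : ∀ a, q a = true → p a = true) (a : α) (ha : a ∈ l)
    (hpa : p a = true) (hqa : q a = false) : l.countP q < l.countP p := by
  induction l with
  | nil => cases ha
  | cons b t ih =>
    rcases List.mem_cons.mp ha with rfl | hmem
    · have hle := List.countP_mono_left (l := t) (p := q) (q := p) (fun a _ h => hmono a h)
      simp [hpa, hqa]
      omega
    · have hlt := ih hmem
      by_cases hqb : q b = true
      · simp [hqb, hmono b hqb]; omega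
      · simp only [Bool.not_eq_true] at hqb
        simp [List.countP_cons, hqb]
        split <;> omega

-- a row scanned to none over a nonempty range had its first cell visited
theorem pvRowScanGo_none_mem (x y : Int) (n : Nat) (vs : PySem.Set (Int × Int))
    (h : pvRowScanGo x y (n + 1) vs = none) : (x, y) ∈ vs := by
  by_contra hmem
  rw [pvRowScanGo, if_pos hmem] at h
  cases h

-- any two sufficient fuels give the rows loop the same value (0 < max_y: rows are nonempty)
theorem pvRowsGo_fuel (max_y : Int) (vs : PySem.Set (Int × Int)) (hm : 0 < max_y) :
    ∀ (f₁ : Nat) (x : Int) (f₂ : Nat), vs.countP (fun p => decide (x ≤ p.1)) < f₁ →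
      vs.countP (fun p => decide (x ≤ p.1)) < f₂ →
      pvRowsGo f₁ x max_y vs = pvRowsGo f₂ x max_y vs := by
  intro f₁
  induction f₁ with
  | zero => intro x f₂ h₁ _; omega
  | succ f ih =>
    intro x f₂ h₁ h₂
    match f₂, h₂ with
    | f₂ + 1, h₂ =>
      rw [pvRowsGo, pvRowsGo]
      cases hsc : pvRowScan x 0 max_y vs with
      | some y => rfl
      | none =>
        have hn : ∃ k, (max_y - 0).toNat = k + 1 := ⟨(max_y - 1).toNat, by omega⟩
        obtain ⟨k, hk⟩ := hn
        have hmem : (x, (0 : Int)) ∈ vs := by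
          apply pvRowScanGo_none_mem x 0 k vs
          rw [← hk]; exact hsc
        have hdrop : vs.countP (fun p => decide (x + 1 ≤ p.1)) <
            vs.countP (fun p => decide (x ≤ p.1)) :=
          pv_countP_lt vs _ _ (by intro a ha; simp at *; omega) (x, 0) hmem
            (by simp) (by simp)
        exact ih (x + 1) f₂ (by omega) (by omega)

-- under 1 ≤ m, B satisfies exactly A's one-step recurrence
theorem alt_unfold (x y m : Int) (v : List (Int × Int)) (hm : 1 ≤ m) :
    move_cursor_alt x y m v =
      if y < m - 1 then
        (if (x, y + 1) ∉ v then (x, y + 1) else move_cursor_alt x (y + 1) m v)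
      else
        (if (x + 1, (0 : Int)) ∉ v then (x + 1, 0) else move_cursor_alt (x + 1) 0 m v) := by
  have hmem : ∀ p : Int × Int, p ∈ PySem.Set.ofList v ↔ p ∈ v := fun p => PySem.Set.mem_ofList v p
  by_cases hy : y < m - 1
  · rw [if_pos hy]
    have hk : ∃ k, (m - (y + 1)).toNat = k + 1 ∧ (m - (y + 1 + 1)).toNat = k :=
      ⟨(m - (y + 2)).toNat, by omega, by omega⟩
    obtain ⟨k, hk1, hk2⟩ := hk
    have hsc : pvRowScan x (y + 1) m (PySem.Set.ofList v) =
        if (x, y + 1) ∉ PySem.Set.ofList v then some (y + 1)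
        else pvRowScan x (y + 1 + 1) m (PySem.Set.ofList v) := by
      rw [pvRowScan, hk1, pvRowScanGo, pvRowScan, hk2]
    by_cases hv : (x, y + 1) ∈ v
    · rw [if_neg (by simpa using hv)]
      show move_cursor_alt x y m v = move_cursor_alt x (y + 1) m v
      unfold move_cursor_alt
      rw [hsc, if_neg (by simp [hmem, hv])]
    · rw [if_pos (by simpa using hv)]
      unfold move_cursor_alt
      rw [hsc, if_pos (by simp [hmem, hv])]
  · rw [if_neg hy]
    have halt : move_cursor_alt x y m v =
        pvRowsGo ((PySem.Set.ofList v).countP (fun p => decide (x + 1 ≤ p.1)) + 1)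
          (x + 1) m (PySem.Set.ofList v) := by
      unfold move_cursor_alt
      rw [pvRowScan, (by omega : (m - (y + 1)).toNat = 0), pvRowScanGo]
    rw [halt, pvRowsGo]
    have hk : ∃ k, (m - 0).toNat = k + 1 ∧ (m - (0 + 1 : Int)).toNat = k :=
      ⟨(m - 1).toNat, by omega, by omega⟩
    obtain ⟨k, hk1, hk2⟩ := hk
    have hsc : pvRowScan (x + 1) 0 m (PySem.Set.ofList v) =
        if (x + 1, (0 : Int)) ∉ PySem.Set.ofList v then some 0
        else pvRowScan (x + 1) (0 + 1) m (PySem.Set.ofList v) := by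
      rw [pvRowScan, hk1, pvRowScanGo, pvRowScan, hk2]
    by_cases hv : (x + 1, (0 : Int)) ∈ v
    · rw [if_neg (by simpa using hv)]
      rw [hsc, if_neg (by simp [hmem, hv])]
      unfold move_cursor_alt
      cases hfind : pvRowScan (x + 1) (0 + 1) m (PySem.Set.ofList v) with
      | some yy => rfl
      | none =>
        have hcell : (x + 1, (0 : Int)) ∈ PySem.Set.ofList v := by simp [hmem, hv]
        have hdrop : (PySem.Set.ofList v).countP (fun p => decide (x + 1 + 1 ≤ p.1)) <
            (PySem.Set.ofList v).countP (fun p => decide (x + 1 ≤ p.1)) :=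
          pv_countP_lt _ _ _ (by intro a ha; simp at *; omega) (x + 1, 0) hcell
            (by simp) (by simp)
        exact pvRowsGo_fuel m (PySem.Set.ofList v) (by omega) _ (x + 1 + 1) _
          (by omega) (by omega)
    · rw [if_pos (by simpa using hv)]
      rw [hsc, if_pos (by simp [hmem, hv])]

-- with enough fuel, A's stepper lands on B's value (induction on the fuel; the count of
-- visited cells past the cursor drops with every recursive call)
theorem pv_main_go (m : Int) (v : List (Int × Int)) (hm : 1 ≤ m) :
    ∀ (fuel : Nat) (x y : Int), v.countP (pvLex x y) < fuel →
      move_cursor_go fuel x y m v = move_cursor_alt x y m v := by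
  intro fuel
  induction fuel with
  | zero => intro x y h; omega
  | succ f ih =>
    intro x y h
    rw [move_cursor_go, alt_unfold x y m v hm]
    by_cases hy : y < m - 1
    · rw [if_pos hy, if_pos hy]
      by_cases hv : (x, y + 1) ∈ v
      · rw [if_neg (by simpa using hv), if_neg (by simpa using hv)]
        have hdrop : v.countP (pvLex x (y + 1)) < v.countP (pvLex x y) :=
          pv_countP_lt v _ _ (by intro a ha; simp [pvLex] at *; omega) (x, y + 1) hv
            (by simp [pvLex]) (by simp [pvLex])
        exact ih x (y + 1) (by omega)
      · rw [if_pos (by simpa using hv), if_pos (by simpa using hv)]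
    · rw [if_neg hy, if_neg hy]
      by_cases hv : (x + 1, (0 : Int)) ∈ v
      · rw [if_neg (by simpa using hv), if_neg (by simpa using hv)]
        have hdrop : v.countP (pvLex (x + 1) 0) < v.countP (pvLex x y) :=
          pv_countP_lt v _ _ (by intro a ha; simp [pvLex] at *; omega) (x + 1, 0) hv
            (by simp [pvLex]) (by simp [pvLex])
        exact ih (x + 1) 0 (by omega)
      · rw [if_pos (by simpa using hv), if_pos (by simpa using hv)]

-- ===== VERDICT (by name: the statement is the Claim_ definition above) =====
theorem move_cursor_spec : Claim_equal_move_cursor := by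
  intro cursor_x cursor_y max_y visited _ hpre
  exact pv_main_go max_y visited hpre _ cursor_x cursor_y (by omega)
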